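-- pv_equiv track=rewrite | github.com/davidmzeng/beat-the-landlord | beat_the_landlord.py | is_quad_with_two_pairs
-- ===== SOURCE A (Python) =====
-- RANK_ORDER = ("3", "4", "5", "6", "7", "8", "9", "10", "J", "Q", "K", "A", "2", "B", "R")
--
-- def is_quad_with_two_pairs(combo):
--     """
--     Takes a combo as an argument and returns True if it is a "quad with two pairs" combo type,
--     returns False otherwise
--     """
--     if len(combo) != 8: # check for invalid number of cards
--         return False
--     for card in combo: # check for invalid cards
--         if card not in RANK_ORDER:
--             return False
--     rank_counts = {}
--     for card in combo: # put combo into a dictionary representing frequency of each card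
--         if card not in rank_counts:
--             rank_counts[card] = 1
--         else:
--             rank_counts[card] += 1
--     for card in combo:
--         if rank_counts[card] != 4 and rank_counts[card] != 2: # check that we have only quads and pairs
--             return False
--     counts_list = list(rank_counts.values()) # get all the counts of each rank
--     count_quads = counts_list.count(4) # counts how many quads exist
--     count_pairs = counts_list.count(2) # counts how many pairs exist
--     return (count_quads == 1 and count_pairs == 2)
-- ===== SOURCE B (Python) =====
-- RANK_ORDER = ("3", "4", "5", "6", "7", "8", "9", "10", "J", "Q", "K", "A", "2", "B", "R")
--
-- def is_quad_with_two_pairs(combo):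
--     if len(combo) != 8:
--         return False
--     quads = pairs = extras = 0
--     for rank in RANK_ORDER:
--         n = combo.count(rank)
--         if n == 4:
--             quads += 1
--         elif n == 2:
--             pairs += 1
--         elif n != 0:
--             extras += 1
--     return quads == 1 and pairs == 2 and extras == 0
-- ===== Notes on version B (the rewrite author's own statement) =====
-- stated objective: simpler
-- what changed: B drops A's per-card membership loop, frequency dict and two counts_list.count scans entirely: it iterates once over the fixed 15-rank table, classifies combo.count(rank) into quad/pair/extra tallies, and returns quads==1 and pairs==2 and extras==0 (invalid cards are impossible to miss since the signature forces the counted cards to sum to 8 = len(combo)).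
import Mathlib
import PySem

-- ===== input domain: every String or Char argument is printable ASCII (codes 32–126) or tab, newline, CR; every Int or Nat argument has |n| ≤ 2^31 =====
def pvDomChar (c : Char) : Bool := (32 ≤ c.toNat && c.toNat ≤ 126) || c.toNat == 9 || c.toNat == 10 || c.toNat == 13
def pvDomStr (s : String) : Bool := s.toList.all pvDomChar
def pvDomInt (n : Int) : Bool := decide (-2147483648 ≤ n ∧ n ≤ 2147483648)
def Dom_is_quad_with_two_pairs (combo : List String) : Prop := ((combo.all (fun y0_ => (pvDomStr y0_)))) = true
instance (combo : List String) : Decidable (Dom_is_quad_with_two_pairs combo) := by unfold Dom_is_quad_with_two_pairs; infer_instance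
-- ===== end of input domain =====

-- B replaces A's per-card membership loop + frequency dict + counts_list scans by one pass over the
-- fixed 15-rank table tallying quad/pair/extra signature counts; objective: simpler.

-- ===== PORT A =====
def RANK_ORDER : List String := ["3", "4", "5", "6", "7", "8", "9", "10", "J", "Q", "K", "A", "2", "B", "R"]

def is_quad_with_two_pairs (combo : List String) : Bool :=
  if combo.length ≠ 8 then false
  else if combo.any (fun card => !RANK_ORDER.contains card) then false
  else
    let rank_counts : PySem.Dict String Int :=
      combo.foldl (fun d card =>
        if !d.contains card then d.insert card 1 else d.modify card 0 (· + 1)) PySem.Dict.empty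
    if combo.any (fun card => (rank_counts.getD card 0 != 4) && (rank_counts.getD card 0 != 2)) then false
    else
      let counts_list := rank_counts.values
      let count_quads := counts_list.count 4
      let count_pairs := counts_list.count 2
      decide (count_quads = 1 ∧ count_pairs = 2)

-- ===== PORT B =====
def is_quad_with_two_pairs_alt (combo : List String) : Bool :=
  if combo.length ≠ 8 then false
  else
    let st := RANK_ORDER.foldl (fun (st : Int × Int × Int) rank =>
      let n := PySem.List.count combo rank
      if n == 4 then (st.1 + 1, st.2.1, st.2.2)
      else if n == 2 then (st.1, st.2.1 + 1, st.2.2)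
      else if n != 0 then (st.1, st.2.1, st.2.2 + 1)
      else st) ((0 : Int), (0 : Int), (0 : Int))
    decide (st.1 = 1 ∧ st.2.1 = 2 ∧ st.2.2 = 0)

-- ===== PRECONDITION & SPEC =====
def Spec_is_quad_with_two_pairs (combo : List String) (out : Bool) : Prop := out = is_quad_with_two_pairs_alt combo
instance (combo : List String) (out : Bool) : Decidable (Spec_is_quad_with_two_pairs combo out) := by unfold Spec_is_quad_with_two_pairs; infer_instance

-- ===== CLAIM (what is proved, stated in full; the proofs are below) =====
def Claim_equal_is_quad_with_two_pairs : Prop := ∀ (combo : List String), Dom_is_quad_with_two_pairs combo → Spec_is_quad_with_two_pairs combo (is_quad_with_two_pairs combo)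

-- ===== LEMMAS AND PROOFS =====

-- the three classification predicates B's loop tallies
def pvP4 (combo : List String) (r : String) : Bool := List.count r combo == 4
def pvP2 (combo : List String) (r : String) : Bool := List.count r combo == 2
def pvPX (combo : List String) (r : String) : Bool :=
  !(List.count r combo == 4) && !(List.count r combo == 2) && !(List.count r combo == 0)

-- A's frequency loop builds exactly Counter(combo).
theorem foldA_eq_counter (combo : List String) :
    combo.foldl (fun d card =>
      if !d.contains card then d.insert card 1 else d.modify card 0 (· + 1)) PySem.Dict.empty
    = PySem.Dict.counter combo := by
  rw [PySem.Dict.counter_eq_foldl]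
  apply PySem.List.foldl_congr_mem
  intro d card _
  by_cases h : d.contains card = true
  · simp [h]
  · simp only [Bool.not_eq_true] at h
    simp [h, PySem.Dict.insert, PySem.Dict.modify, PySem.Dict.getD_of_not_contains d 0 h]

-- B's fold step, named for the proofs (definitionally the lambda in is_quad_with_two_pairs_alt)
def pvStep (combo : List String) (st : Int × Int × Int) (rank : String) : Int × Int × Int :=
  let n := PySem.List.count combo rank
  if n == 4 then (st.1 + 1, st.2.1, st.2.2)
  else if n == 2 then (st.1, st.2.1 + 1, st.2.2)
  else if n != 0 then (st.1, st.2.1, st.2.2 + 1)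
  else st

theorem pvStep_eq (combo : List String) (r : String) (q p e : Int) :
    pvStep combo (q, p, e) r =
      (q + if pvP4 combo r then 1 else 0,
       p + if pvP2 combo r then 1 else 0,
       e + if pvPX combo r then 1 else 0) := by
  unfold pvStep pvP4 pvP2 pvPX
  simp only [PySem.List.count_eq]
  by_cases h4 : List.count r combo = 4
  · simp [h4]
  · by_cases h2 : List.count r combo = 2
    · simp [h2]
    · by_cases h0 : List.count r combo = 0
      · simp [h0]
      · simp [h4, h2, h0]

-- B's loop tallies the countP of each classification predicate.
theorem foldB_eq (combo : List String) : ∀ (l : List String) (q p e : Int),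
    l.foldl (pvStep combo) (q, p, e)
    = (q + (l.countP (pvP4 combo) : Int),
       p + (l.countP (pvP2 combo) : Int),
       e + (l.countP (pvPX combo) : Int)) := by
  intro l
  induction l with
  | nil => intro q p e; simp
  | cons r l ih =>
    intro q p e
    rw [List.foldl_cons, pvStep_eq, ih]
    simp only [List.countP_cons, Prod.mk.injEq]
    refine ⟨?_, ?_, ?_⟩ <;> (push_cast; split_ifs <;> omega)

-- countP agrees on two duplicate-free lists containing the same satisfying elements.
theorem countP_eq_of_nodup {α : Type} (p : α → Bool) (l1 l2 : List α)
    (h1 : l1.Nodup) (h2 : l2.Nodup)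
    (hm : ∀ x, p x = true → (x ∈ l1 ↔ x ∈ l2)) : l1.countP p = l2.countP p := by
  rw [List.countP_eq_length_filter, List.countP_eq_length_filter]
  refine ((List.perm_ext_iff_of_nodup (h1.filter p) (h2.filter p)).mpr ?_).length_eq
  intro x
  simp only [List.mem_filter]
  constructor
  · rintro ⟨hx, hp⟩; exact ⟨(hm x hp).mp hx, hp⟩
  · rintro ⟨hx, hp⟩; exact ⟨(hm x hp).mpr hx, hp⟩

-- summing combo.count over a duplicate-free rank list counts the cards lying in it
-- a 0/1 Nat-sum is a countP (Nat twin of PySem.List.sum_map_ite_one_zero, which is Int-valued)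
theorem sum_map_ite_eq_countP {α : Type} (p : α → Bool) (l : List α) :
    (l.map (fun x => if p x then (1 : Nat) else 0)).sum = l.countP p := by
  induction l with
  | nil => simp
  | cons x l ih => simp only [List.map_cons, List.sum_cons, List.countP_cons, ih]; omega

theorem sum_count_eq_countP_mem (combo : List String) : ∀ (R : List String), R.Nodup →
    (R.map (fun r => List.count r combo)).sum = combo.countP (fun c => R.contains c) := by
  induction combo with
  | nil => intro R _; simp
  | cons c combo ih =>
    intro R hR
    calc (R.map (fun r => List.count r (c :: combo))).sum
        = (R.map (fun r => List.count r combo + if c == r then 1 else 0)).sum := by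
          simp only [List.count_cons]
      _ = (R.map (fun r => List.count r combo)).sum + (R.map (fun r => if c == r then 1 else 0)).sum := by
          rw [← List.sum_map_add]
      _ = combo.countP (fun x => R.contains x) + R.countP (fun r => c == r) := by
          rw [ih R hR, sum_map_ite_eq_countP (fun r => c == r) R]
      _ = (c :: combo).countP (fun x => R.contains x) := by
          rw [List.countP_cons]
          have hcomm : R.countP (fun r => c == r) = R.countP (fun r => r == c) := by
            simp only [Bool.beq_comm]
          rw [hcomm, ← List.count_eq_countP, List.Nodup.count hR]
          by_cases hc : c ∈ R
          · simp [hc]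
          · simp [hc]

-- when every rank count is 0, 2 or 4, the total is 4·(#quads) + 2·(#pairs)
theorem sum_eq_of_no_extras (combo : List String) : ∀ (R : List String),
    (∀ r ∈ R, pvPX combo r = false) →
    (R.map (fun r => List.count r combo)).sum
      = 4 * R.countP (pvP4 combo) + 2 * R.countP (pvP2 combo) := by
  intro R
  induction R with
  | nil => simp
  | cons r R ih =>
    intro h
    have hr := h r (by simp)
    have hrest : ∀ x ∈ R, pvPX combo x = false := fun x hx => h x (List.mem_cons_of_mem r hx)
    simp only [List.map_cons, List.sum_cons, List.countP_cons, ih hrest]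
    simp only [pvPX, pvP4, pvP2, Bool.and_eq_false_iff, Bool.not_eq_false', beq_iff_eq] at hr ⊢
    rcases hr with (h4 | h2) | h0
    · simp [h4]
      omega
    · simp [h2]
      omega
    · simp [h0]

theorem nodup_rank_order : RANK_ORDER.Nodup := by decide

-- characterization of A = true (for an 8-card combo)
theorem A_true_iff (combo : List String) (h8 : combo.length = 8) :
    is_quad_with_two_pairs combo = true ↔
      (∀ c ∈ combo, c ∈ RANK_ORDER) ∧ (∀ c ∈ combo, List.count c combo = 4 ∨ List.count c combo = 2) ∧
      (PySem.Set.ofList combo).countP (pvP4 combo) = 1 ∧ (PySem.Set.ofList combo).countP (pvP2 combo) = 2 := by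
  unfold is_quad_with_two_pairs
  rw [if_neg (by omega)]
  simp only [foldA_eq_counter]
  by_cases hval : combo.any (fun card => !RANK_ORDER.contains card) = true
  · rw [if_pos hval]
    simp only [Bool.false_eq_true, false_iff]
    rintro ⟨hv, -⟩
    obtain ⟨c, hc, hnc⟩ := List.any_eq_true.mp hval
    have hmem : c ∈ RANK_ORDER := hv c hc
    simp [List.contains_eq_mem, hmem] at hnc
  · rw [if_neg hval]
    have hvalid : ∀ c ∈ combo, c ∈ RANK_ORDER := by
      intro c hc
      by_contra hnc
      exact hval (List.any_eq_true.mpr ⟨c, hc, by simpa using hnc⟩)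
    by_cases hbad : combo.any (fun card =>
        ((PySem.Dict.counter combo).getD card 0 != 4) && ((PySem.Dict.counter combo).getD card 0 != 2)) = true
    · rw [if_pos hbad]
      simp only [Bool.false_eq_true, false_iff]
      obtain ⟨c, hc, hb⟩ := List.any_eq_true.mp hbad
      simp only [PySem.Dict.getD_counter, Bool.and_eq_true, bne_iff_ne, ne_eq] at hb
      rintro ⟨-, hcnt, -⟩
      rcases hcnt c hc with h | h
      · exact hb.1 (by exact_mod_cast h)
      · exact hb.2 (by exact_mod_cast h)
    · rw [if_neg hbad]
      have hcnt : ∀ c ∈ combo, List.count c combo = 4 ∨ List.count c combo = 2 := by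
        intro c hc
        have hx : ¬ (((PySem.Dict.counter combo).getD c 0 != 4) && ((PySem.Dict.counter combo).getD c 0 != 2)) = true :=
          fun hcon => hbad (List.any_eq_true.mpr ⟨c, hc, hcon⟩)
        simp only [PySem.Dict.getD_counter, Bool.and_eq_true, bne_iff_ne, ne_eq, not_and_or, not_not] at hx
        rcases hx with h | h
        · left; exact_mod_cast h
        · right; exact_mod_cast h
      have hvalues : (PySem.Dict.counter combo).values
          = (PySem.Set.ofList combo).map (fun k => (List.count k combo : Int)) := by
        rw [PySem.Dict.values_eq_map_keys _ (PySem.Dict.nodup_keys_counter combo) 0,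
            PySem.Dict.keys_counter]
        exact List.map_congr_left (fun k _ => PySem.Dict.getD_counter combo k)
      have hc4 : (PySem.Dict.counter combo).values.count 4 = (PySem.Set.ofList combo).countP (pvP4 combo) := by
        rw [hvalues, List.count_eq_countP, List.countP_map]
        refine List.countP_congr (fun k _ => ?_)
        simp only [Function.comp_apply, pvP4, beq_iff_eq]
        omega
      have hc2 : (PySem.Dict.counter combo).values.count 2 = (PySem.Set.ofList combo).countP (pvP2 combo) := by
        rw [hvalues, List.count_eq_countP, List.countP_map]
        refine List.countP_congr (fun k _ => ?_)
        simp only [Function.comp_apply, pvP2, beq_iff_eq]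
        omega
      rw [decide_eq_true_iff, hc4, hc2]
      tauto

-- characterization of B = true (for an 8-card combo)
theorem B_true_iff (combo : List String) (h8 : combo.length = 8) :
    is_quad_with_two_pairs_alt combo = true ↔
      RANK_ORDER.countP (pvP4 combo) = 1 ∧ RANK_ORDER.countP (pvP2 combo) = 2 ∧
      RANK_ORDER.countP (pvPX combo) = 0 := by
  unfold is_quad_with_two_pairs_alt
  rw [if_neg (by omega)]
  rw [show (fun (st : Int × Int × Int) rank =>
      let n := PySem.List.count combo rank
      if n == 4 then (st.1 + 1, st.2.1, st.2.2)
      else if n == 2 then (st.1, st.2.1 + 1, st.2.2)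
      else if n != 0 then (st.1, st.2.1, st.2.2 + 1)
      else st) = pvStep combo from rfl]
  rw [foldB_eq combo RANK_ORDER 0 0 0]
  simp only [decide_eq_true_iff]
  omega

-- ===== VERDICT (by name: the statement is the Claim_ definition above) =====
theorem is_quad_with_two_pairs_spec : Claim_equal_is_quad_with_two_pairs := by
  intro combo _
  unfold Spec_is_quad_with_two_pairs
  by_cases h8 : combo.length = 8
  case neg =>
    unfold is_quad_with_two_pairs is_quad_with_two_pairs_alt
    rw [if_pos h8, if_pos h8]
  case pos =>
    rw [Bool.eq_iff_iff, A_true_iff combo h8, B_true_iff combo h8]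
    have hkeys_nodup : (PySem.Set.ofList combo).Nodup := PySem.Set.nodup_ofList combo
    constructor
    · rintro ⟨hval, hcnt, h4, h2⟩
      have mem4 : ∀ x, pvP4 combo x = true → (x ∈ RANK_ORDER ↔ x ∈ PySem.Set.ofList combo) := by
        intro x hx
        simp only [pvP4, beq_iff_eq] at hx
        have hxc : x ∈ combo := List.count_pos_iff.mp (by omega)
        simp [PySem.Set.mem_ofList, hxc, hval x hxc]
      have mem2 : ∀ x, pvP2 combo x = true → (x ∈ RANK_ORDER ↔ x ∈ PySem.Set.ofList combo) := by
        intro x hx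
        simp only [pvP2, beq_iff_eq] at hx
        have hxc : x ∈ combo := List.count_pos_iff.mp (by omega)
        simp [PySem.Set.mem_ofList, hxc, hval x hxc]
      refine ⟨?_, ?_, ?_⟩
      · rw [countP_eq_of_nodup (pvP4 combo) RANK_ORDER (PySem.Set.ofList combo) nodup_rank_order hkeys_nodup mem4]; exact h4
      · rw [countP_eq_of_nodup (pvP2 combo) RANK_ORDER (PySem.Set.ofList combo) nodup_rank_order hkeys_nodup mem2]; exact h2
      · rw [List.countP_eq_zero]
        intro r _
        simp only [pvPX, Bool.and_eq_true, Bool.not_eq_true', beq_eq_false_iff_ne, ne_eq, not_and_or, not_not]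
        by_cases hr : List.count r combo = 0
        · tauto
        · have : r ∈ combo := List.count_pos_iff.mp (by omega)
          rcases hcnt r this with h | h <;> tauto
    · rintro ⟨h4, h2, hx⟩
      have hnoex : ∀ r ∈ RANK_ORDER, pvPX combo r = false := by
        intro r hr
        simpa using List.countP_eq_zero.mp hx r hr
      have hsum : (RANK_ORDER.map (fun r => List.count r combo)).sum = 8 := by
        rw [sum_eq_of_no_extras combo RANK_ORDER hnoex, h4, h2]
      have hall : ∀ c ∈ combo, RANK_ORDER.contains c = true := by
        rw [← List.countP_eq_length]
        rw [← sum_count_eq_countP_mem combo RANK_ORDER nodup_rank_order]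
        omega
      have hval : ∀ c ∈ combo, c ∈ RANK_ORDER := by
        intro c hc
        simpa using hall c hc
      have hcnt : ∀ c ∈ combo, List.count c combo = 4 ∨ List.count c combo = 2 := by
        intro c hc
        have hne := hnoex c (hval c hc)
        simp only [pvPX, Bool.and_eq_false_iff, Bool.not_eq_false', beq_iff_eq] at hne
        have hpos : 0 < List.count c combo := List.count_pos_iff.mpr hc
        rcases hne with (h | h) | h <;> omega
      have mem4 : ∀ x, pvP4 combo x = true → (x ∈ PySem.Set.ofList combo ↔ x ∈ RANK_ORDER) := by
        intro x hxp
        simp only [pvP4, beq_iff_eq] at hxp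
        have hxc : x ∈ combo := List.count_pos_iff.mp (by omega)
        simp [PySem.Set.mem_ofList, hxc, hval x hxc]
      have mem2 : ∀ x, pvP2 combo x = true → (x ∈ PySem.Set.ofList combo ↔ x ∈ RANK_ORDER) := by
        intro x hxp
        simp only [pvP2, beq_iff_eq] at hxp
        have hxc : x ∈ combo := List.count_pos_iff.mp (by omega)
        simp [PySem.Set.mem_ofList, hxc, hval x hxc]
      refine ⟨hval, hcnt, ?_, ?_⟩
      · rw [countP_eq_of_nodup (pvP4 combo) (PySem.Set.ofList combo) RANK_ORDER hkeys_nodup nodup_rank_order mem4]; exact h4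
      · rw [countP_eq_of_nodup (pvP2 combo) (PySem.Set.ofList combo) RANK_ORDER hkeys_nodup nodup_rank_order mem2]; exact h2
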